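-- pv_equiv track=rewrite | github.com/daniel-reich/ubiquitous-fiesta | xYRNzJB7kAXXEQSdF_24.py | wiggle_string
-- ===== SOURCE A (Python) =====
-- def wiggle_string(s):
--   output = []
--   offset = 0
--   while offset < len(s)+1:
--     output.append((' '*offset+s))
--     offset += 1
--   offset -= 2
--   while offset > -1:
--     output.append((' '*offset+s))
--     offset -= 1
--   return output
-- ===== SOURCE B (Python) =====
-- def wiggle_string(s):
--     n = len(s)
--     out = [' ' * n + s]
--     for i in range(n - 1, -1, -1):
--         pad = ' ' * i + s
--         out = [pad] + out + [pad]
--     return out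
-- ===== Notes on version B (the rewrite author's own statement) =====
-- stated objective: alternative
-- what changed: Replaces A's two sequential append loops (ascending then descending offset) with a single inside-out loop that starts from the most-indented line and sandwiches each less-indented line onto both ends of the accumulator, so the descending half is never built by a second construction pass.
import Mathlib
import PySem

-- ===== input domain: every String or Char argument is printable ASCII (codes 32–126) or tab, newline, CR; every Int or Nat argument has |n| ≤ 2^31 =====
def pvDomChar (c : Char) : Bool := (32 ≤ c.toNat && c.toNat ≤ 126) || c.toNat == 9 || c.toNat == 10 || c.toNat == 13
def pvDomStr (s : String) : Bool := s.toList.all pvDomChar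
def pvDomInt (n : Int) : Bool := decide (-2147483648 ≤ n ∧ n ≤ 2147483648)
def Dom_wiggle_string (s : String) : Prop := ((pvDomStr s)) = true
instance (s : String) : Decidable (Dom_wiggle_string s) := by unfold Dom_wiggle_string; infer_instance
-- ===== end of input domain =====

-- B builds the palindromic output by one inside-out loop (each step sandwiches the
-- accumulator between two copies of a padded string); A runs two construction loops.

-- ===== PORT A =====
-- first while loop: offset counts up from 0 while offset < len(s)+1
def wiggleUpA (s : String) (offset : Nat) : List String :=
  if offset < s.toList.length + 1 then
    String.ofList (List.replicate offset ' ' ++ s.toList) :: wiggleUpA s (offset + 1)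
  else []
termination_by s.toList.length + 1 - offset
decreasing_by simp [String.length_toList] at *; omega

-- second while loop: offset counts down while offset > -1 (offset ≥ 0 whenever the body runs)
def wiggleDownA (s : String) (offset : Int) : List String :=
  if offset > -1 then
    String.ofList (List.replicate offset.toNat ' ' ++ s.toList) :: wiggleDownA s (offset - 1)
  else []
termination_by (offset + 1).toNat
decreasing_by omega

def wiggle_string (s : String) : List String :=
  wiggleUpA s 0 ++ wiggleDownA s ((s.toList.length : Int) + 1 - 2)

-- ===== PORT B =====
-- single inside-out loop: start from the most-indented line, sandwich each i = n-1..0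
def wiggle_string_alt (s : String) : List String :=
  let n := s.toList.length
  (PySem.List.pyRange ((n : Int) - 1) (-1) (-1)).foldl
    (fun out i =>
      [String.ofList (List.replicate i.toNat ' ' ++ s.toList)] ++ out
        ++ [String.ofList (List.replicate i.toNat ' ' ++ s.toList)])
    [String.ofList (List.replicate n ' ' ++ s.toList)]

-- ===== PRECONDITION & SPEC =====
def Spec_wiggle_string (s : String) (out : List String) : Prop := out = wiggle_string_alt s
instance (s : String) (out : List String) : Decidable (Spec_wiggle_string s out) := by unfold Spec_wiggle_string; infer_instance

-- ===== CLAIM (what is proved, stated in full; the proofs are below) =====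
def Claim_equal_wiggle_string : Prop := ∀ (s : String), Dom_wiggle_string s → Spec_wiggle_string s (wiggle_string s)

-- ===== LEMMAS AND PROOFS =====

-- the padded string built on both sides
def pvPad (s : String) (i : Nat) : String := String.ofList (List.replicate i ' ' ++ s.toList)

theorem wiggleUpA_eq (s : String) (j : Nat) : ∀ (k : Nat), s.toList.length + 1 - k = j →
    wiggleUpA s k = (List.range' k j).map (pvPad s) := by
  induction j with
  | zero =>
    intro k hk
    rw [wiggleUpA.eq_def, if_neg (by omega)]
    simp
  | succ n ih =>
    intro k hk
    rw [wiggleUpA.eq_def, if_pos (by omega), ih (k + 1) (by omega), List.range'_succ]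
    rfl

theorem wiggleDownA_eq (s : String) (m : Nat) :
    wiggleDownA s ((m : Int) - 1) = ((List.range m).map (pvPad s)).reverse := by
  induction m with
  | zero => rw [wiggleDownA.eq_def]; norm_num
  | succ n ih =>
    rw [wiggleDownA.eq_def, if_pos (by omega)]
    have h1 : ((n + 1 : Nat) : Int) - 1 - 1 = (n : Int) - 1 := by push_cast; ring
    have h2 : (((n + 1 : Nat) : Int) - 1).toNat = n := by omega
    rw [h1, h2, ih, List.range_succ]
    simp [pvPad]

-- the accumulator's value when the B loop has sandwiched all indices down to i
def pvAcc (s : String) (n i : Nat) : List String :=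
  (List.range' i (n - i + 1)).map (pvPad s) ++ ((List.range' i (n - i)).map (pvPad s)).reverse

theorem loopB_eq (s : String) (n : Nat) : ∀ (i : Nat), i ≤ n →
    (PySem.List.pyRange ((i : Int) - 1) (-1) (-1)).foldl
      (fun out j =>
        [String.ofList (List.replicate j.toNat ' ' ++ s.toList)] ++ out
          ++ [String.ofList (List.replicate j.toNat ' ' ++ s.toList)])
      (pvAcc s n i) = pvAcc s n 0 := by
  intro i
  induction i with
  | zero =>
    intro _
    rw [PySem.List.pyRange_neg_one_eq_nil (by omega)]
    rfl
  | succ m ih =>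
    intro hm
    have hc : ((m + 1 : Nat) : Int) - 1 = (m : Int) := by push_cast; ring
    rw [hc, PySem.List.pyRange_neg_one_cons (by omega), List.foldl_cons]
    have hstep :
        [String.ofList (List.replicate (m : Int).toNat ' ' ++ s.toList)] ++ pvAcc s n (m + 1)
          ++ [String.ofList (List.replicate (m : Int).toNat ' ' ++ s.toList)] = pvAcc s n m := by
      have ht : (m : Int).toNat = m := by omega
      have h1 : n - m + 1 = (n - (m + 1) + 1) + 1 := by omega
      have h2 : n - m = (n - (m + 1)) + 1 := by omega
      rw [ht]
      unfold pvAcc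
      rw [h1, h2]
      simp [pvPad, List.range'_succ]
    have ha : ((m : Int) - 1) = ((m : Nat) : Int) - 1 := by norm_num
    rw [hstep, ha, ih (by omega)]

theorem wiggle_string_spec : Claim_equal_wiggle_string := by
  intro s _
  unfold Spec_wiggle_string wiggle_string wiggle_string_alt
  have hup : wiggleUpA s 0 = (List.range (s.toList.length + 1)).map (pvPad s) := by
    rw [wiggleUpA_eq s (s.toList.length + 1) 0 (by omega)]; simp [List.range_eq_range']
  have harg : (s.toList.length : Int) + 1 - 2 = (s.toList.length : Int) - 1 := by ring
  have hinit : [String.ofList (List.replicate s.toList.length ' ' ++ s.toList)]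
      = pvAcc s s.toList.length s.toList.length := by
    simp [pvAcc, pvPad]
  rw [hup, harg, wiggleDownA_eq]
  dsimp only
  rw [hinit, loopB_eq s s.toList.length s.toList.length (le_refl _)]
  simp [pvAcc, List.range_eq_range']
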